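-- pv_equiv track=rewrite | github.com/bakunobu/exercise | 1400_basic_tasks/chap_6/6_45.py | min_indexing
-- ===== SOURCE A (Python) =====
-- def min_indexing(n:int) -> tuple:
--     i = 0
--     md = 9
--     mdi = 0
--     while n:
--         num = n % 10
--         if num < md:
--             md = num
--             mdi = i
--         n //= 10
--         i += 1
--     return(mdi, i - 1 - mdi)
-- ===== SOURCE B (Python) =====
-- def min_indexing(n: int) -> tuple:
--     s = str(n)
--     md = min(s)
--     j = s.rindex(md)
--     return (len(s) - 1 - j, j)
-- ===== Notes on version B (the rewrite author's own statement) =====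
-- stated objective: idiomatic
-- what changed: Replaces A's modulo/floordiv running-minimum digit loop with string passes: str(n), min() over the characters and rindex() for the rightmost occurrence of the smallest digit.
-- intended difference: On n == 0 A's loop never runs and it returns the sentinel (0, -1), an impossible position; B returns (0, 0), the actual position of the digit '0' of str(0), which is the intended value. — e.g. on min_indexing(0): A returns (0, -1), B returns (0, 0)
import Mathlib
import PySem

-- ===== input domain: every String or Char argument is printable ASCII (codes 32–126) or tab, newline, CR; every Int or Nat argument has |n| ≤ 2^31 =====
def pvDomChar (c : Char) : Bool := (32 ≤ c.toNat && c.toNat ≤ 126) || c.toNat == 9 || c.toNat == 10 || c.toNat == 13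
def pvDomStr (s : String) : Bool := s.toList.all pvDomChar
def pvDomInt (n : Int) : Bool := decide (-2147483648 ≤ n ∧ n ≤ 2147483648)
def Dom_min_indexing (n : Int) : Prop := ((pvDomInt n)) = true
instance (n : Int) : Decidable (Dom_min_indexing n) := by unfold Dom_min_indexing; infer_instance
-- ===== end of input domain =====

-- B re-implements A on the string form of n: min() + rindex() instead of A's divmod loop
-- (objective: idiomatic; same linear cost).

-- ===== PORT A =====
-- Python's 'while n:' loop; the guard is '0 < n' because for n < 0 the Python loop never
-- terminates (those inputs are excluded by Pre_min_indexing below).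
def minIndexLoop (n i md mdi : Int) : Int × Int :=
  if 0 < n then
    let num := PySem.Int.mod n 10
    if num < md then minIndexLoop (PySem.Int.floordiv n 10) (i + 1) num i
    else minIndexLoop (PySem.Int.floordiv n 10) (i + 1) md mdi
  else (mdi, i - 1 - mdi)
termination_by n.toNat
decreasing_by
  all_goals
    rw [PySem.Int.floordiv_eq_ediv_of_pos (by norm_num : (0:Int) < 10)]
    omega

def min_indexing (n : Int) : Int × Int := minIndexLoop n 0 9 0

-- ===== PORT B =====
-- s.rindex(c) for c ∈ s: index of the last occurrence, counted from the left (exact there;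
-- B only calls it with c = min(s), which is always a character of s).
def rindexChars (cs : List Char) (c : Char) : Int :=
  (cs.length : Int) - 1 - (cs.reverse.idxOf c : Int)

def min_indexing_alt (n : Int) : Int × Int :=
  let cs := (PySem.Int.toStr n).toList
  -- min(s): s = str(n) is never empty, so Python's min never raises; getD is unreachable
  let md := (PySem.List.min? cs (fun c => c)).getD '0'
  let j := rindexChars cs md
  ((cs.length : Int) - 1 - j, j)

-- ===== PRECONDITION & SPEC =====
-- Pre_ excludes n < 0, on which Python A's 'while n:' loop never terminates (n //= 10 reaches -1 and stays).
def Pre_min_indexing (n : Int) : Prop := 0 ≤ n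
instance (n : Int) : Decidable (Pre_min_indexing n) := by unfold Pre_min_indexing; infer_instance
def pvWitness_min_indexing : Int := 120345

-- On n == 0 A's loop never runs and it returns the sentinel (0, -1), an impossible position;
-- B returns (0, 0), the actual position of the digit '0' of str(0), which is the intended value.
def D_min_indexing (n : Int) : Prop := n = 0
instance (n : Int) : Decidable (D_min_indexing n) := by unfold D_min_indexing; infer_instance

def Spec_min_indexing (n : Int) (out : Int × Int) : Prop := ¬ D_min_indexing n → out = min_indexing_alt n
instance (n : Int) (out : Int × Int) : Decidable (Spec_min_indexing n out) := by unfold Spec_min_indexing; infer_instance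

def pvDiffWitness_min_indexing : Int := 0
def pvDiffWitnessOut_min_indexing : (Int × Int) × (Int × Int) := ((0, -1), (0, 0))

-- ===== CLAIM (what is proved, stated in full; the proofs are below) =====
def Claim_unchanged_min_indexing : Prop := ∀ (n : Int), Dom_min_indexing n → Pre_min_indexing n → Spec_min_indexing n (min_indexing n)
def Claim_changed_min_indexing : Prop := Dom_min_indexing (pvDiffWitness_min_indexing) ∧ Pre_min_indexing (pvDiffWitness_min_indexing) ∧ D_min_indexing (pvDiffWitness_min_indexing) ∧ min_indexing (pvDiffWitness_min_indexing) = pvDiffWitnessOut_min_indexing.1 ∧ min_indexing_alt (pvDiffWitness_min_indexing) = pvDiffWitnessOut_min_indexing.2 ∧ pvDiffWitnessOut_min_indexing.1 ≠ pvDiffWitnessOut_min_indexing.2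
def Claim_exact_min_indexing : Prop := ∀ (n : Int), Dom_min_indexing n → Pre_min_indexing n → D_min_indexing n → min_indexing n ≠ min_indexing_alt n

-- ===== LEMMAS AND PROOFS =====

-- A's loop, re-read over the LSB-first digit list.
def loopList (ds : List Nat) (i md mdi : Int) : Int × Int :=
  match ds with
  | [] => (mdi, i - 1 - mdi)
  | d :: t => if (d : Int) < md then loopList t (i + 1) (d : Int) i else loopList t (i + 1) md mdi

-- index (in ds) of the last update A's loop makes when started with current minimum md
def fmi (ds : List Nat) (md : Int) : Option Nat :=
  match ds with
  | [] => none
  | d :: t =>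
    if (d : Int) < md then
      some (match fmi t (d : Int) with | none => 0 | some k => k + 1)
    else (fmi t md).map (· + 1)

theorem digitChar_le_iff : ∀ d < 10, ∀ e < 10, (Nat.digitChar d ≤ Nat.digitChar e ↔ d ≤ e) := by decide

theorem digitChar_inj : ∀ d < 10, ∀ e < 10, Nat.digitChar d = Nat.digitChar e → d = e := by decide

theorem toDigitsCore_eq (fuel : Nat) : ∀ (n : Nat) (ds : List Char), 0 < n → n < fuel →
    Nat.toDigitsCore 10 fuel n ds = ((Nat.digits 10 n).map Nat.digitChar).reverse ++ ds := by
  induction fuel with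
  | zero => intro n ds h hf; omega
  | succ f ih =>
    intro n ds hn hf
    rw [Nat.digits_def' (by norm_num : 1 < 10) hn]
    simp only [Nat.toDigitsCore, List.map_cons, List.reverse_cons]
    by_cases h0 : n / 10 = 0
    · simp [h0]
    · rw [if_neg h0, ih (n / 10) _ (Nat.pos_of_ne_zero h0) (by omega)]
      simp

theorem toChars_pos (n : Int) (hn : 0 < n) :
    (PySem.Int.toStr n).toList = ((Nat.digits 10 n.toNat).map Nat.digitChar).reverse := by
  rw [PySem.Int.toList_toStr]
  unfold PySem.Int.toChars
  rw [if_neg (by omega)]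
  unfold Nat.toDigits
  rw [toDigitsCore_eq _ _ _ (by omega) (by omega)]
  simp

theorem minIndexLoop_eq_loopList (m : Nat) : ∀ (i md mdi : Int),
    minIndexLoop (m : Int) i md mdi = loopList (Nat.digits 10 m) i md mdi := by
  induction m using Nat.strong_induction_on with
  | _ m ih =>
    intro i md mdi
    rcases Nat.eq_zero_or_pos m with h0 | hm
    · subst h0
      rw [minIndexLoop]
      simp [loopList]
    · rw [minIndexLoop, if_pos (by exact_mod_cast hm),
        Nat.digits_def' (by norm_num : 1 < 10) hm, loopList]
      have hmod : PySem.Int.mod (m : Int) 10 = ((m % 10 : Nat) : Int) := by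
        exact_mod_cast PySem.Int.mod_natCast m 10
      have hdiv : PySem.Int.floordiv (m : Int) 10 = ((m / 10 : Nat) : Int) := by
        exact_mod_cast PySem.Int.floordiv_natCast m 10
      rw [hmod, hdiv]
      have hlt : m / 10 < m := Nat.div_lt_self hm (by norm_num)
      by_cases hc : ((m % 10 : Nat) : Int) < md
      · rw [if_pos hc, if_pos hc, ih _ hlt]
      · rw [if_neg hc, if_neg hc, ih _ hlt]

theorem loopList_eq_fmi (ds : List Nat) : ∀ (i md mdi : Int),
    loopList ds i md mdi =
      match fmi ds md with
      | none => (mdi, i + ds.length - 1 - mdi)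
      | some k => (i + k, i + ds.length - 1 - (i + k)) := by
  induction ds with
  | nil => intro i md mdi; simp [loopList, fmi]
  | cons d t ih =>
    intro i md mdi
    by_cases hc : (d : Int) < md
    · rw [loopList, if_pos hc, fmi, if_pos hc, ih]
      rcases h : fmi t (d : Int) with _ | k <;> simp <;> omega
    · rw [loopList, if_neg hc, fmi, if_neg hc, ih]
      rcases h : fmi t md with _ | k <;> simp <;> omega

theorem fmi_none (ds : List Nat) (md : Int) (h : ∀ a ∈ ds, ¬ (a : Int) < md) : fmi ds md = none := by
  induction ds with
  | nil => rfl
  | cons d t ih =>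
    rw [fmi, if_neg (h d (by simp))]
    rw [ih (fun a ha => h a (by simp [ha]))]
    rfl

theorem fmi_min (ds : List Nat) : ∀ (M : Nat) (md : Int), M ∈ ds → (∀ a ∈ ds, M ≤ a) →
    (M : Int) < md → fmi ds md = some (ds.idxOf M) := by
  induction ds with
  | nil => intro M md h; simp at h
  | cons d t ih =>
    intro M md hmem hmin hlt
    by_cases hc : (d : Int) < md
    · rw [fmi, if_pos hc]
      by_cases ht : ∃ a ∈ t, (a : Int) < (d : Int)
      · obtain ⟨a, ha, halt⟩ := ht
        have hMt : M ∈ t := by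
          have hMa : M ≤ a := hmin a (by simp [ha])
          have hMd : M ≠ d := by omega
          rcases List.mem_cons.mp hmem with h | h
          · omega
          · exact h
        have hMd : M ≠ d := by
          have := hmin a (by simp [ha])
          omega
        rw [ih M (d : Int) hMt (fun a ha => hmin a (by simp [ha])) (by
          have := hmin a (by simp [ha]); omega)]
        rw [List.idxOf_cons_ne _ (by exact fun h => hMd (by exact_mod_cast h.symm))]
      · simp only [not_exists, not_and] at ht
        have : fmi t (d : Int) = none := fmi_none t _ (fun a ha => ht a ha)
        rw [this]
        have hMd : M = d := by
          have h1 : M ≤ d := hmin d (by simp)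
          rcases List.mem_cons.mp hmem with h | h
          · exact h
          · have := ht M h; omega
        subst hMd
        simp [List.idxOf_cons_self]
    · have hMd : M ≠ d := by omega
      rw [fmi, if_neg hc]
      have hMt : M ∈ t := by
        rcases List.mem_cons.mp hmem with h | h
        · omega
        · exact h
      rw [ih M md hMt (fun a ha => hmin a (by simp [ha])) hlt]
      rw [List.idxOf_cons_ne _ (by exact fun h => hMd (by exact_mod_cast h.symm))]
      rfl

theorem idxOf_map_digitChar (ds : List Nat) (M : Nat) (hds : ∀ d ∈ ds, d < 10) (hM : M < 10) :
    (ds.map Nat.digitChar).idxOf (Nat.digitChar M) = ds.idxOf M := by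
  induction ds with
  | nil => rfl
  | cons d t ih =>
    by_cases h : d = M
    · subst h; simp [List.idxOf_cons_self]
    · rw [List.map_cons,
        List.idxOf_cons_ne _ (by
          intro hc
          exact h (digitChar_inj d (hds d (by simp)) M hM (by exact_mod_cast hc))),
        List.idxOf_cons_ne _ (by exact fun hc => h (by exact_mod_cast hc)),
        ih (fun a ha => hds a (by simp [ha]))]

theorem min_char_eq (ds : List Nat) (M : Nat) (cs : List Char)
    (hcs : cs = (ds.map Nat.digitChar).reverse)
    (hds : ∀ d ∈ ds, d < 10) (hM : M < 10)
    (hmem : M ∈ ds) (hmin : ∀ a ∈ ds, M ≤ a) :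
    (PySem.List.min? cs (fun c => c)).getD '0' = Nat.digitChar M := by
  have hne : cs ≠ [] := by
    subst hcs
    simp only [ne_eq, List.reverse_eq_nil_iff, List.map_eq_nil_iff]
    intro h; subst h; simp at hmem
  rcases hmd : PySem.List.min? cs (fun c => c) with _ | md
  · exact absurd ((PySem.List.min?_eq_none_iff cs (fun c => c)).mp hmd) hne
  · have hmdmem : md ∈ cs := PySem.List.min?_mem hmd
    have hmdmin : ∀ y ∈ cs, md ≤ y := by
      intro y hy
      exact PySem.List.min?_isMin hmd y hy
    have hMcs : Nat.digitChar M ∈ cs := by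
      subst hcs; simp only [List.mem_reverse, List.mem_map]; exact ⟨M, hmem, rfl⟩
    obtain ⟨e, he, hemd⟩ : ∃ e ∈ ds, Nat.digitChar e = md := by
      subst hcs
      simpa only [List.mem_reverse, List.mem_map] using hmdmem
    have h1 : md ≤ Nat.digitChar M := hmdmin _ hMcs
    have h2 : Nat.digitChar M ≤ md := by
      rw [← hemd]
      exact (digitChar_le_iff M hM e (hds e he)).mpr (hmin e he)
    simp [le_antisymm h1 h2]

theorem main_eq (n : Int) (hn : 0 < n) : min_indexing n = min_indexing_alt n := by
  set m := n.toNat with hm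
  have hn' : n = (m : Int) := by omega
  have hm0 : 0 < m := by omega
  set ds := Nat.digits 10 m with hdsdef
  have hdsne : ds ≠ [] := Nat.digits_ne_nil_iff_ne_zero.mpr (by omega)
  have hds : ∀ d ∈ ds, d < 10 := fun d hd => Nat.digits_lt_base (by norm_num) hd
  obtain ⟨M, hMmem, hMmin⟩ : ∃ M ∈ ds, ∀ a ∈ ds, M ≤ a := by
    obtain ⟨M, hM⟩ : ∃ M, ds.min? = some M := by
      rcases h' : ds.min? with _ | M
      · exact absurd (List.min?_eq_none_iff.mp h') hdsne
      · exact ⟨M, rfl⟩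
    obtain ⟨h1, h2⟩ := List.min?_eq_some_iff.mp hM
    exact ⟨M, h1, h2⟩
  have hM10 : M < 10 := hds M hMmem
  -- LHS
  have hcs : (PySem.Int.toStr n).toList = (ds.map Nat.digitChar).reverse := by
    rw [hn', toChars_pos _ (by exact_mod_cast hm0)]
    simp [hdsdef]
  have hA : min_indexing n = ((ds.idxOf M : Int), (ds.length : Int) - 1 - (ds.idxOf M : Int)) := by
    unfold min_indexing
    rw [hn', minIndexLoop_eq_loopList, loopList_eq_fmi]
    by_cases h9 : M < 9
    · rw [fmi_min ds M 9 hMmem hMmin (by exact_mod_cast h9)]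
      simp [← hdsdef]
    · -- M = 9: every digit is 9, the loop never updates, and 9 is at index 0
      have hM9 : M = 9 := by omega
      have hall : ∀ a ∈ ds, a = 9 := by
        intro a ha
        have h1 := hMmin a ha
        have h2 := hds a ha
        omega
      rw [fmi_none ds 9 (by intro a ha; have := hall a ha; omega)]
      have hidx : ds.idxOf M = 0 := by
        rcases hds' : ds with _ | ⟨d, t⟩
        · exact absurd hds' hdsne
        · have : d = 9 := hall d (by rw [hds']; simp)
          rw [this, hM9, List.idxOf_cons_self]
      simp [hidx, ← hdsdef]
  -- RHS
  simp only [min_indexing_alt, rindexChars, hcs,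
    min_char_eq ds M _ rfl hds hM10 hMmem hMmin,
    List.reverse_reverse, idxOf_map_digitChar ds M hds hM10,
    List.length_reverse, List.length_map]
  rw [hA]
  exact Prod.ext (by ring) rfl

-- ===== VERDICT (by name: the statement is the Claim_ definition above) =====
theorem min_indexing_spec : Claim_unchanged_min_indexing := by
  intro n _ hpre hnd
  have h0 : n ≠ 0 := fun h => hnd h
  exact (main_eq n (by unfold Pre_min_indexing at hpre; omega)).symm ▸ rfl

theorem min_indexing_A_zero : min_indexing 0 = (0, -1) := by
  unfold min_indexing
  rw [minIndexLoop]
  norm_num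

theorem min_indexing_B_zero : min_indexing_alt 0 = (0, 0) := by decide

theorem min_indexing_changed : Claim_changed_min_indexing := by
  unfold Claim_changed_min_indexing
  exact ⟨by decide, by decide, by decide, min_indexing_A_zero, min_indexing_B_zero, by decide⟩

theorem min_indexing_tight : Claim_exact_min_indexing := by
  intro n _ _ hd
  unfold D_min_indexing at hd
  subst hd
  rw [min_indexing_A_zero, min_indexing_B_zero]
  decide
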